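-- pv_equiv track=rewrite | github.com/gabrielsoltz/clauditor | clauditor/checkers/file_content.py | _entry_present
-- ===== SOURCE A (Python) =====
-- def _entry_present(content: str, pattern: str, owner: str | None) -> bool:
--     """
--     Check whether a file contains a line matching pattern + owner.
--     Matching is whitespace-tolerant and case-insensitive for the owner.
--     """
--     for line in content.splitlines():
--         stripped = line.strip()
--         if stripped.startswith("#") or not stripped:
--             continue
--         parts = stripped.split()
--         if not parts:
--             continue
--         file_pattern = parts[0]
--         owners = parts[1:] if len(parts) > 1 else []
--         if file_pattern == pattern:
--             if owner is None:
--                 return len(owners) > 0  # pattern must have at least one owner assigned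
--             if any(o.lower() == owner.lower() for o in owners):
--                 return True
--     return False
-- ===== SOURCE B (Python) =====
-- def _entry_present(content: str, pattern: str, owner: str | None) -> bool:
--     # Two-pass: parse all entries first, then answer the query over the entry list.
--     entries = []
--     for line in content.splitlines():
--         stripped = line.strip()
--         if stripped and not stripped.startswith("#"):
--             parts = stripped.split()
--             entries.append((parts[0], parts[1:]))
--     if owner is None:
--         first = next((e for e in entries if e[0] == pattern), None)
--         return first is not None and len(first[1]) > 0
--     ow = owner.lower()
--     return any(p == pattern and any(o.lower() == ow for o in ows) for p, ows in entries)
-- ===== Notes on version B (the rewrite author's own statement) =====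
-- stated objective: alternative
-- what changed: B splits A's fused scan-with-early-return into a parse pass building a (pattern, owners) entry list and a separate query pass: first-match lookup for owner=None, an any-over-entries for a concrete owner.
import Mathlib
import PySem

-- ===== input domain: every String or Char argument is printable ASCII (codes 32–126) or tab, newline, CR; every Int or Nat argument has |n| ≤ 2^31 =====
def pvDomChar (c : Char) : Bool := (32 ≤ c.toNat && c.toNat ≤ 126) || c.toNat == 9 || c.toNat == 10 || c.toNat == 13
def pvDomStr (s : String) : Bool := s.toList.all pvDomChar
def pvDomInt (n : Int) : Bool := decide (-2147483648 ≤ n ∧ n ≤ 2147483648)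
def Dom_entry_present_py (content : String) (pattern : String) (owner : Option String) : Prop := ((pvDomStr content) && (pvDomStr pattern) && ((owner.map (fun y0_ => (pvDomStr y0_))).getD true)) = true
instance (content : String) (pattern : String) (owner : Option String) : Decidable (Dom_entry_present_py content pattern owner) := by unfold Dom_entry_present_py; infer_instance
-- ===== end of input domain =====

-- B splits A's fused scan into a parse pass (entry list) plus a query pass: alternative decomposition, same cost.
-- ===== PORT A =====
def pvLoopA (pattern : String) (owner : Option String) : List String → Bool
  | [] => false
  | line :: rest =>
    let stripped := PySem.Str.strip line
    if PySem.Str.startswith stripped "#" || stripped = "" then pvLoopA pattern owner rest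
    else
      match PySem.Str.split₀ stripped with
      | [] => pvLoopA pattern owner rest
      | fp :: owners =>
        if fp = pattern then
          match owner with
          | none => decide (owners.length > 0)
          | some ow =>
            if owners.any (fun o => PySem.Str.lower o = PySem.Str.lower ow) then true
            else pvLoopA pattern owner rest
        else pvLoopA pattern owner rest

def entry_present_py (content : String) (pattern : String) (owner : Option String) : Bool :=
  pvLoopA pattern owner (PySem.Str.splitlines content)

-- ===== PORT B =====
-- parse pass: one entry per non-comment, non-blank line (the [] branch of split₀ is unreachable:
-- a stripped nonempty line always splits into at least one token)
def pvLineEntry (line : String) : Option (String × List String) :=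
  let stripped := PySem.Str.strip line
  if stripped = "" || PySem.Str.startswith stripped "#" then none
  else
    match PySem.Str.split₀ stripped with
    | [] => none
    | t :: ts => some (t, ts)

-- query pass over the parsed entries
def pvQuery (entries : List (String × List String)) (pattern : String) (owner : Option String) : Bool :=
  match owner with
  | none =>
    match entries.find? (fun e => e.1 = pattern) with
    | none => false
    | some e => decide (e.2.length > 0)
  | some ow =>
    entries.any (fun e => e.1 = pattern && e.2.any (fun o => PySem.Str.lower o = PySem.Str.lower ow))

def entry_present_py_alt (content : String) (pattern : String) (owner : Option String) : Bool :=
  pvQuery ((PySem.Str.splitlines content).filterMap pvLineEntry) pattern owner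

-- ===== PRECONDITION & SPEC =====
def Spec_entry_present_py (content : String) (pattern : String) (owner : Option String) (out : Bool) : Prop := out = entry_present_py_alt content pattern owner
instance (content : String) (pattern : String) (owner : Option String) (out : Bool) : Decidable (Spec_entry_present_py content pattern owner out) := by unfold Spec_entry_present_py; infer_instance

-- ===== CLAIM (what is proved, stated in full; the proofs are below) =====
def Claim_equal_entry_present_py : Prop := ∀ (content : String) (pattern : String) (owner : Option String), Dom_entry_present_py content pattern owner → Spec_entry_present_py content pattern owner (entry_present_py content pattern owner)

-- ===== LEMMAS AND PROOFS =====

-- ===== VERDICT (by name: the statement is the Claim_ definition above) =====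
theorem pvStepA (pattern : String) (owner : Option String) (line : String) (rest : List String) :
    pvLoopA pattern owner (line :: rest) =
      match pvLineEntry line with
      | none => pvLoopA pattern owner rest
      | some (fp, owners) =>
        if fp = pattern then
          match owner with
          | none => decide (owners.length > 0)
          | some ow =>
            if owners.any (fun o => PySem.Str.lower o = PySem.Str.lower ow) then true
            else pvLoopA pattern owner rest
        else pvLoopA pattern owner rest := by
  simp only [pvLoopA, pvLineEntry]
  by_cases h1 : PySem.Str.strip line = "" <;>
    by_cases h2 : PySem.Str.startswith (PySem.Str.strip line) "#" = true <;>
      simp only [h1, h2, decide_true, decide_false, Bool.or_true, Bool.true_or,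
        Bool.or_false, Bool.false_or, if_true, if_false, ite_true, ite_false] <;>
    cases hs : PySem.Str.split₀ (PySem.Str.strip line) <;> simp [hs]

theorem pvQuery_cons_none (fp : String) (owners : List String)
    (es : List (String × List String)) (pattern : String) :
    pvQuery ((fp, owners) :: es) pattern none =
      if fp = pattern then decide (owners.length > 0) else pvQuery es pattern none := by
  by_cases hp : fp = pattern <;> simp [pvQuery, List.find?, hp]

theorem pvQuery_cons_some (fp : String) (owners : List String)
    (es : List (String × List String)) (pattern ow : String) :
    pvQuery ((fp, owners) :: es) pattern (some ow) =
      ((decide (fp = pattern) && owners.any (fun o => PySem.Str.lower o = PySem.Str.lower ow))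
        || pvQuery es pattern (some ow)) := by
  simp [pvQuery]

theorem pvLoop_eq_query (pattern : String) (owner : Option String) :
    ∀ lines : List String, pvLoopA pattern owner lines = pvQuery (lines.filterMap pvLineEntry) pattern owner := by
  intro lines
  induction lines with
  | nil => cases owner <;> rfl
  | cons line rest ih =>
    rw [pvStepA, List.filterMap_cons]
    cases he : pvLineEntry line with
    | none => simpa using ih
    | some e =>
      obtain ⟨fp, owners⟩ := e
      cases owner with
      | none =>
        rw [pvQuery_cons_none]
        by_cases hp : fp = pattern <;> simp [hp, ih]
      | some ow =>
        rw [pvQuery_cons_some]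
        by_cases hp : fp = pattern
        · by_cases ha : owners.any (fun o => PySem.Str.lower o = PySem.Str.lower ow) = true <;>
            simp [hp, ha, ih]
        · simp [hp, ih]

theorem entry_present_py_spec : Claim_equal_entry_present_py := by
  intro content pattern owner _
  unfold Spec_entry_present_py entry_present_py entry_present_py_alt
  exact pvLoop_eq_query pattern owner _
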